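-- pv_equiv track=rewrite | github.com/jdgibbons/PycharmProjects | Generic Game Generator/bonanza_utilities.py | translate_bptid_to_integer
-- ===== SOURCE A (Python) =====
-- numeral_string = "0123456789ABCDEFGHIJKLMNPQRSTUVWXYZ"
--
-- def translate_bptid_to_integer(bpt_id):
--     """
--     Translates a Bonanza number into its integer equivalent
--     :type bpt_id: str
--     :rtype int
--     :param bpt_id: Bonanza alphanumeric string
--     :return: integer equivalent of Bonanza value
--     """
--     # Base size = total number of characters in the string
--     base_size = len(numeral_string)
--     total = 0
--     power = 1
--     for letter in bpt_id[::-1]: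
--         # Cycle through the passed string in reverse to assure
--         # the correct power is used while multiplying. Find the
--         # letter's index value, multiply it by the base power
--         # associated with the current slot, and add the result to
--         # the total. Raise the base power to the next order of
--         # magnitude.
--         index = numeral_string.find(letter)
--         total += index * power
--         power *= base_size
--     return total
-- ===== SOURCE B (Python) =====
-- numeral_string = "0123456789ABCDEFGHIJKLMNPQRSTUVWXYZ"
--
-- def translate_bptid_to_integer(bpt_id):
--     # Forward Horner evaluation: no power variable, no reversal.
--     base_size = len(numeral_string)
--     total = 0
--     for letter in bpt_id:
--         total = total * base_size + numeral_string.find(letter)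
--     return total
-- ===== Notes on version B (the rewrite author's own statement) =====
-- stated objective: idiomatic
-- what changed: Replaces the reversed-iteration loop that maintains a separate running power-of-base with a forward Horner evaluation keeping a single multiply-accumulate total.
import Mathlib
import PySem

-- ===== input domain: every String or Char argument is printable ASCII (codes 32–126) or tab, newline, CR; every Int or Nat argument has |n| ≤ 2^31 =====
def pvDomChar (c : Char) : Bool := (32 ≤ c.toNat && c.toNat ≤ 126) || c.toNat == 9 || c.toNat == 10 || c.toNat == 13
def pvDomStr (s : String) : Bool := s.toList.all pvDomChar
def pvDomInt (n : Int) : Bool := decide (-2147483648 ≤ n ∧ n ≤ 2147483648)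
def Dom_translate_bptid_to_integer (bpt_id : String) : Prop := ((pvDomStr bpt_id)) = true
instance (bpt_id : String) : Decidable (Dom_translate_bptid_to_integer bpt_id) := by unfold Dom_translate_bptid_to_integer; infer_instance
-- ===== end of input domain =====

-- B replaces A's reversed loop with a separate power accumulator by a forward Horner
-- multiply-accumulate; same O(n) cost, plainer state (objective: idiomatic).

def numeral_string : String := "0123456789ABCDEFGHIJKLMNPQRSTUVWXYZ"

-- ===== PORT A =====
-- bpt_id[::-1] iterated in order = bpt_id.toList.reverse (exact for a full reversed slice)
def translate_bptid_to_integer (bpt_id : String) : Int :=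
  let base_size : Int := PySem.Str.len numeral_string
  let r := (bpt_id.toList.reverse).foldl
    (fun (tp : Int × Int) letter =>
      let index := PySem.Str.find numeral_string (String.mk [letter])
      (tp.1 + index * tp.2, tp.2 * base_size))
    (0, 1)
  r.1

-- ===== PORT B =====
def translate_bptid_to_integer_alt (bpt_id : String) : Int :=
  let base_size : Int := PySem.Str.len numeral_string
  bpt_id.toList.foldl
    (fun total letter => total * base_size + PySem.Str.find numeral_string (String.mk [letter]))
    0

-- ===== PRECONDITION & SPEC =====
def Spec_translate_bptid_to_integer (bpt_id : String) (out : Int) : Prop := out = translate_bptid_to_integer_alt bpt_id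
instance (bpt_id : String) (out : Int) : Decidable (Spec_translate_bptid_to_integer bpt_id out) := by unfold Spec_translate_bptid_to_integer; infer_instance

-- ===== CLAIM (what is proved, stated in full; the proofs are below) =====
def Claim_equal_translate_bptid_to_integer : Prop := ∀ (bpt_id : String), Dom_translate_bptid_to_integer bpt_id → Spec_translate_bptid_to_integer bpt_id (translate_bptid_to_integer bpt_id)

-- ===== LEMMAS AND PROOFS =====

-- Horner fold with a nonzero start: the start contributes start * b^|l|.
theorem horner_foldl_shift (f : Char → Int) (b : Int) (l : List Char) :
    ∀ t : Int, l.foldl (fun total c => total * b + f c) t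
      = t * b ^ l.length + l.foldl (fun total c => total * b + f c) 0 := by
  induction l with
  | nil => intro t; simp
  | cons c l ih =>
    intro t
    simp only [List.foldl_cons, List.length_cons]
    rw [ih (t * b + f c), ih (0 * b + f c)]
    ring

-- The reverse-with-power fold equals (Horner value, b^|l|).
theorem rev_fold_eq_horner (f : Char → Int) (b : Int) (l : List Char) :
    (l.reverse.foldl (fun (tp : Int × Int) c => (tp.1 + f c * tp.2, tp.2 * b)) (0, 1))
      = (l.foldl (fun total c => total * b + f c) 0, b ^ l.length) := by
  rw [List.foldl_reverse]
  induction l with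
  | nil => simp
  | cons c l ih =>
    simp only [List.foldr_cons, List.length_cons, ih, List.foldl_cons]
    rw [horner_foldl_shift f b l (0 * b + f c)]
    exact Prod.ext (by ring) (by ring)

-- ===== VERDICT (by name: the statement is the Claim_ definition above) =====
theorem translate_bptid_to_integer_spec : Claim_equal_translate_bptid_to_integer := by
  intro bpt_id _
  unfold Spec_translate_bptid_to_integer translate_bptid_to_integer translate_bptid_to_integer_alt
  simp only [rev_fold_eq_horner]
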